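-- pv_equiv track=rewrite | github.com/SoulViolin/Advent-of-Code-2023 | Quest-15/Part-1.py | hash_algorithm
-- ===== SOURCE A (Python) =====
-- def hash_algorithm(s):
--     current_value = 0
--
--     for char in s:
--         ascii_code = ord(char)
--         current_value += ascii_code
--         current_value *= 17
--         current_value %= 256
--
--     return current_value
-- ===== SOURCE B (Python) =====
-- def hash_algorithm(s):
--     n = len(s)
--     return sum(ord(ch) * pow(17, n - i, 256) for i, ch in enumerate(s)) % 256
-- ===== Notes on version B (the rewrite author's own statement) =====
-- stated objective: alternative
-- what changed: Replaced the sequential accumulator loop by a closed-form weighted sum: each character contributes ord(ch)*17^(n-i) mod 256, summed independently and reduced once.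
import Mathlib
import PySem

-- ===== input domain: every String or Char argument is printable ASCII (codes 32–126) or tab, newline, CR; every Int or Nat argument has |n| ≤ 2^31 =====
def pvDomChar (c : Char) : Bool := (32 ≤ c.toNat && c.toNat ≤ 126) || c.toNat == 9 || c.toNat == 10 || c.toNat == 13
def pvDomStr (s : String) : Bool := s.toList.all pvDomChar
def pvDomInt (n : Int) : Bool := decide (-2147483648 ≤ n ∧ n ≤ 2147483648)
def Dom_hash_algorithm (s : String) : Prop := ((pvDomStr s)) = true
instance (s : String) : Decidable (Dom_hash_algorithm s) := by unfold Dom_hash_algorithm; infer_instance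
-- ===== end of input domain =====

-- B replaces A's sequential accumulator loop by a closed-form weighted sum (ord(ch)*17^(n-i) mod 256): an alternative decomposition, same result.


-- ===== PORT A =====
-- for char in s: current_value = ((current_value + ord(char)) * 17) % 256
def hash_algorithm (s : String) : Int :=
  s.toList.foldl (fun current_value char =>
    PySem.Int.mod ((current_value + (char.toNat : Int)) * 17) 256) 0

-- ===== PORT B =====
-- sum(ord(ch) * pow(17, n - i, 256) for i, ch in enumerate(s)) % 256   (pow(a,b,m) = a^b % m)
def hash_algorithm_alt (s : String) : Int :=
  let l := s.toList
  let n : Int := l.length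
  PySem.Int.mod
    (((PySem.List.enumerate l).map
      (fun p => (p.2.toNat : Int) * PySem.Int.mod ((17 : Int) ^ (n - p.1).toNat) 256)).sum)
    256

-- ===== PRECONDITION & SPEC =====
def Spec_hash_algorithm (s : String) (out : Int) : Prop := out = hash_algorithm_alt s
instance (s : String) (out : Int) : Decidable (Spec_hash_algorithm s out) := by unfold Spec_hash_algorithm; infer_instance

-- ===== CLAIM =====
def Claim_equal_hash_algorithm : Prop := ∀ (s : String), Dom_hash_algorithm s → Spec_hash_algorithm s (hash_algorithm s)

-- ===== LEMMAS AND PROOFS =====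

-- A's fold without the per-step reduction
def pureFold (acc : Int) (l : List Char) : Int :=
  l.foldl (fun a c => (a + (c.toNat : Int)) * 17) acc

-- B's sum without the inner pow-mod
def pureSum (l : List Char) : Int :=
  ((PySem.List.enumerate l).map
    (fun p => (p.2.toNat : Int) * (17 : Int) ^ (((l.length : Int)) - p.1).toNat)).sum

theorem foldA_eq (l : List Char) : ∀ acc : Int,
    l.foldl (fun a c => ((a + (c.toNat : Int)) * 17) % 256) (acc % 256)
      = pureFold acc l % 256 := by
  induction l with
  | nil => intro acc; simp [pureFold]
  | cons c t ih =>
      intro acc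
      have h : ((acc % 256 + (c.toNat : Int)) * 17) % 256
            = ((acc + (c.toNat : Int)) * 17) % 256 := by omega
      simp only [List.foldl_cons, pureFold] at *
      rw [h]
      exact ih ((acc + (c.toNat : Int)) * 17)

theorem sum_mod_congr {α : Type} (l : List α) (f g : α → Int)
    (h : ∀ x ∈ l, f x % 256 = g x % 256) :
    (l.map f).sum % 256 = (l.map g).sum % 256 := by
  induction l with
  | nil => rfl
  | cons a t ih =>
      simp only [List.map_cons, List.sum_cons]
      have h1 := h a (List.mem_cons_self)
      have h2 := ih (fun x hx => h x (List.mem_cons_of_mem _ hx))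
      omega

theorem term_mod (c e : Int) : (c * (e % 256)) % 256 = (c * e) % 256 := by
  conv_rhs => rw [Int.mul_emod]
  rw [Int.mul_emod, Int.emod_emod_of_dvd _ dvd_rfl]

theorem pureFold_eq_pureSum (l : List Char) : pureFold 0 l = pureSum l := by
  induction l using List.reverseRecOn with
  | nil => rfl
  | append_singleton t c ih =>
      have hfold : pureFold 0 (t ++ [c]) = (pureFold 0 t + (c.toNat : Int)) * 17 := by
        simp [pureFold, List.foldl_append]
      have henum : PySem.List.enumerate (t ++ [c])
          = PySem.List.enumerate t ++ [((t.length : Int), c)] := by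
        rw [PySem.List.enumerate_append]
        simp [PySem.List.enumerate]
      have hmap : (PySem.List.enumerate t).map
            (fun p => (p.2.toNat : Int) * (17 : Int) ^ ((((t ++ [c]).length : Int)) - p.1).toNat)
          = (PySem.List.enumerate t).map
            (fun p => 17 * ((p.2.toNat : Int) * (17 : Int) ^ (((t.length : Int)) - p.1).toNat)) := by
        apply List.map_congr_left
        intro p hp
        rcases (PySem.List.mem_enumerate_iff _ _ _).1 hp with ⟨k, hk, hpk⟩
        subst hpk
        have h1 : (((t ++ [c]).length : Int) - (0 + (k : Int))).toNat
            = ((t.length : Int) - (0 + (k : Int))).toNat + 1 := by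
          simp only [List.length_append, List.length_cons, List.length_nil]
          omega
        rw [h1, pow_succ]
        ring
      unfold pureSum
      rw [hfold, ih, henum, List.map_append, List.sum_append, hmap]
      unfold pureSum
      rw [List.sum_map_mul_left]
      simp only [List.map_cons, List.map_nil, List.sum_cons, List.sum_nil]
      have : (((t ++ [c]).length : Int) - (t.length : Int)).toNat = 1 := by
        simp only [List.length_append, List.length_cons, List.length_nil]
        omega
      rw [this]
      ring

-- ===== VERDICT =====
theorem hash_algorithm_spec : Claim_equal_hash_algorithm := by
  intro s _
  unfold Spec_hash_algorithm hash_algorithm hash_algorithm_alt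
  simp only [PySem.Int.mod_eq_emod_of_pos (by norm_num : (0:Int) < 256)]
  have hA : s.toList.foldl (fun a c => ((a + (c.toNat : Int)) * 17) % 256) 0
      = pureFold 0 s.toList % 256 := by
    have := foldA_eq s.toList 0
    simpa using this
  rw [hA, pureFold_eq_pureSum]
  unfold pureSum
  exact (sum_mod_congr (PySem.List.enumerate s.toList)
    (fun p => (p.2.toNat : Int) * (((17 : Int) ^ (((s.toList.length : Int)) - p.1).toNat) % 256))
    (fun p => (p.2.toNat : Int) * (17 : Int) ^ (((s.toList.length : Int)) - p.1).toNat)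
    (fun p _ => term_mod _ _)).symm
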